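-- pv_equiv track=rewrite | github.com/juniorguru/junior.guru | juniorguru/scrapers/pipelines/junior_rank.py | calc_junior_rank
-- ===== SOURCE A (Python) =====
-- import itertools
--
-- WEIGHTS = {
--     'EXPLICITLY_SENIOR': -8,
--     'YEARS_EXPERIENCE_REQUIRED': -8,
--     'LEADERSHIP_REQUIRED': -8,
--     'TECH_DEGREE_REQUIRED': -6,
--     'ADVANCED_REQUIRED': -4,
--     'INDEPENDENCE_PREFERRED': -2,
--     'ENGLISH_REQUIRED': 0,
--     'CZECH_REQUIRED': 0,
--     'SLOVAK_REQUIRED': 0,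
--     'GERMAN_REQUIRED': 0,
--     'LEARNING_REQUIRED': 2,
--     'JUNIOR_FRIENDLY': 4,
--     'EXPLICITLY_JUNIOR': 6,
-- }
--
-- RELEVANT_FEATURES = {feature for feature, weight
--                      in WEIGHTS.items() if weight}
--
-- ACCUMULATIVE_FEATURES = {
--     'YEARS_EXPERIENCE_REQUIRED',
--     'ADVANCED_REQUIRED',
--     'INDEPENDENCE_PREFERRED',
--     'LEARNING_REQUIRED',
--     'JUNIOR_FRIENDLY',
-- }
--
-- FEW_FEATURES_THRESHOLD = 2
--
-- def calc_junior_rank(features):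
--     features = [f for f in features if f in RELEVANT_FEATURES]
--     features = list(itertools.chain(
--         (f for f in features if f in ACCUMULATIVE_FEATURES),
--         (f for f in frozenset(features) - ACCUMULATIVE_FEATURES),
--     ))
--     if len(features) <= 1:
--         return 0
--     if len(features) <= FEW_FEATURES_THRESHOLD:
--         return sum([int(WEIGHTS[f] / abs(WEIGHTS[f])) for f in features])
--     return sum([WEIGHTS[f] for f in features])
-- ===== SOURCE B (Python) =====
-- def calc_junior_rank(features):
--     # One pass over the features with fixed registers: a multiplicity counter for
--     # each of the five accumulative features, a seen-flag for the other four
--     # weighted features; the score is then closed arithmetic on the registers.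
--     years = advanced = independence = learning = friendly = 0
--     senior = leadership = degree = junior = False
--     for f in features:
--         if f == 'YEARS_EXPERIENCE_REQUIRED':
--             years += 1
--         elif f == 'ADVANCED_REQUIRED':
--             advanced += 1
--         elif f == 'INDEPENDENCE_PREFERRED':
--             independence += 1
--         elif f == 'LEARNING_REQUIRED':
--             learning += 1
--         elif f == 'JUNIOR_FRIENDLY':
--             friendly += 1
--         elif f == 'EXPLICITLY_SENIOR':
--             senior = True
--         elif f == 'LEADERSHIP_REQUIRED':
--             leadership = True
--         elif f == 'TECH_DEGREE_REQUIRED':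
--             degree = True
--         elif f == 'EXPLICITLY_JUNIOR':
--             junior = True
--     n = (years + advanced + independence + learning + friendly
--          + senior + leadership + degree + junior)
--     if n <= 1:
--         return 0
--     if n <= 2:
--         return (learning + friendly - years - advanced - independence
--                 + junior - senior - leadership - degree)
--     return (2 * learning + 4 * friendly - 8 * years - 4 * advanced - 2 * independence
--             + 6 * junior - 8 * senior - 8 * leadership - 6 * degree)
-- ===== Notes on version B (the rewrite author's own statement) =====
-- stated objective: simpler
-- what changed: B replaces A's dict/set pipeline (relevance filter, itertools.chain of an occurrence list with a frozenset difference, then a summed lookup pass) by a single loop over the input that keeps nine fixed registers - one count per accumulative feature, one seen-flag per other weighted feature - and computes the size and the score as closed arithmetic on those registers, with no dictionary, set or intermediate list at all.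
import Mathlib
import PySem

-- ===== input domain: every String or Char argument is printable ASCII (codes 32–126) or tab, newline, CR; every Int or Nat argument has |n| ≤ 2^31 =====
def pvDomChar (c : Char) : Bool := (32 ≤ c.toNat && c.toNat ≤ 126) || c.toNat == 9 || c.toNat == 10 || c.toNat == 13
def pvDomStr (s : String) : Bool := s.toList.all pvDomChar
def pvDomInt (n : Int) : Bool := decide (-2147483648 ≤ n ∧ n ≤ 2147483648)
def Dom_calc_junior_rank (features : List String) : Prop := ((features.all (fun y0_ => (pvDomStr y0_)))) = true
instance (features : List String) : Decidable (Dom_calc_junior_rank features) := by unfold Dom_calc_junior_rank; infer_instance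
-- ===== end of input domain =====

set_option maxRecDepth 100000


-- B drops all of A's dict/set/list machinery: one pass over the features keeps nine
-- fixed registers (a count per accumulative feature, a seen-flag per other weighted
-- feature) and the result is closed arithmetic on the registers (objective: simpler).

-- ===== PORT A =====
def pvWEIGHTS : PySem.Dict String Int := PySem.Dict.ofList
  [("EXPLICITLY_SENIOR", -8), ("YEARS_EXPERIENCE_REQUIRED", -8), ("LEADERSHIP_REQUIRED", -8),
   ("TECH_DEGREE_REQUIRED", -6), ("ADVANCED_REQUIRED", -4), ("INDEPENDENCE_PREFERRED", -2),
   ("ENGLISH_REQUIRED", 0), ("CZECH_REQUIRED", 0), ("SLOVAK_REQUIRED", 0), ("GERMAN_REQUIRED", 0),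
   ("LEARNING_REQUIRED", 2), ("JUNIOR_FRIENDLY", 4), ("EXPLICITLY_JUNIOR", 6)]

-- {feature for feature, weight in WEIGHTS.items() if weight}
def pvRELEVANT : PySem.Set String :=
  PySem.Set.ofList ((pvWEIGHTS.items.filter (fun p => p.2 != 0)).map (fun p => p.1))

def pvACC : PySem.Set String := PySem.Set.ofList
  ["YEARS_EXPERIENCE_REQUIRED", "ADVANCED_REQUIRED", "INDEPENDENCE_PREFERRED",
   "LEARNING_REQUIRED", "JUNIOR_FRIENDLY"]

-- WEIGHTS[f]: every f looked up survived the RELEVANT filter, so the key is present and its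
-- weight is nonzero — getD 0 is exact here (the KeyError case is unreachable), and
-- int(WEIGHTS[f] / abs(WEIGHTS[f])) is the exact integer quotient w / |w| (float division is exact ±1.0).
-- The frozenset difference is consumed only by sum/len, so PySem.Set's order is exact here.
def calc_junior_rank (features : List String) : Int :=
  let fs1 := features.filter (fun f => pvRELEVANT.contains f)
  let fs := fs1.filter (fun f => pvACC.contains f)
            ++ PySem.Set.diff (PySem.Set.ofList fs1) pvACC
  if fs.length ≤ 1 then 0
  else if fs.length ≤ 2 then
    (fs.map (fun f => pvWEIGHTS.getD f 0 / |pvWEIGHTS.getD f 0|)).sum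
  else (fs.map (fun f => pvWEIGHTS.getD f 0)).sum

-- ===== PORT B =====
-- Source B's nine registers, updated by its if/elif chain, consumed by closed arithmetic.
structure JState where
  years : Int
  advanced : Int
  independence : Int
  learning : Int
  friendly : Int
  senior : Bool
  leadership : Bool
  degree : Bool
  junior : Bool
deriving Repr, DecidableEq

def jStep (s : JState) (f : String) : JState :=
  if f == "YEARS_EXPERIENCE_REQUIRED" then { s with years := s.years + 1 }
  else if f == "ADVANCED_REQUIRED" then { s with advanced := s.advanced + 1 }
  else if f == "INDEPENDENCE_PREFERRED" then { s with independence := s.independence + 1 }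
  else if f == "LEARNING_REQUIRED" then { s with learning := s.learning + 1 }
  else if f == "JUNIOR_FRIENDLY" then { s with friendly := s.friendly + 1 }
  else if f == "EXPLICITLY_SENIOR" then { s with senior := true }
  else if f == "LEADERSHIP_REQUIRED" then { s with leadership := true }
  else if f == "TECH_DEGREE_REQUIRED" then { s with degree := true }
  else if f == "EXPLICITLY_JUNIOR" then { s with junior := true }
  else s

-- Python's bool in arithmetic context
def b2i (b : Bool) : Int := if b then 1 else 0

def calc_junior_rank_alt (features : List String) : Int :=
  let s := features.foldl jStep ⟨0, 0, 0, 0, 0, false, false, false, false⟩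
  let n := s.years + s.advanced + s.independence + s.learning + s.friendly
           + b2i s.senior + b2i s.leadership + b2i s.degree + b2i s.junior
  if n ≤ 1 then 0
  else if n ≤ 2 then
    s.learning + s.friendly - s.years - s.advanced - s.independence
      + b2i s.junior - b2i s.senior - b2i s.leadership - b2i s.degree
  else
    2 * s.learning + 4 * s.friendly - 8 * s.years - 4 * s.advanced - 2 * s.independence
      + 6 * b2i s.junior - 8 * b2i s.senior - 8 * b2i s.leadership - 6 * b2i s.degree

-- ===== PRECONDITION & SPEC =====
def Spec_calc_junior_rank (features : List String) (out : Int) : Prop := out = calc_junior_rank_alt features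
instance (features : List String) (out : Int) : Decidable (Spec_calc_junior_rank features out) := by unfold Spec_calc_junior_rank; infer_instance

-- ===== CLAIM (what is proved, stated in full; the proofs are below) =====
def Claim_equal_calc_junior_rank : Prop := ∀ (features : List String), Dom_calc_junior_rank features → Spec_calc_junior_rank features (calc_junior_rank features)

-- ===== LEMMAS AND PROOFS =====

lemma pv_toFinset_ofList (l : List String) : (PySem.Set.ofList l).toFinset = l.toFinset := by
  ext x; simp [PySem.Set.mem_ofList]

-- sum of g over a list with multiplicity = Finset sum of count * g
lemma pv_sum_count (l : List String) (g : String → Int) :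
    (l.map g).sum = ∑ k ∈ l.toFinset, (l.count k : Int) * g k := by
  have := Finset.sum_multiset_map_count (l : Multiset String) g
  simpa [Int.nsmul_eq_mul] using this

-- A's asymmetric list (accumulative occurrences ++ deduped rest), summed through g,
-- as one Finset sum over the distinct elements
lemma pv_master (l : List String) (g : String → Int) :
    ((l.filter (fun f => pvACC.contains f)).map g).sum
      + ((PySem.Set.diff (PySem.Set.ofList l) pvACC).map g).sum
    = ∑ k ∈ l.toFinset, (if pvACC.contains k then (l.count k : Int) * g k else g k) := by
  have hnd : (PySem.Set.ofList l).Nodup := PySem.Set.nodup_ofList l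
  rw [← Finset.sum_filter_add_sum_filter_not l.toFinset (fun k => pvACC.contains k = true)]
  congr 1
  · rw [pv_sum_count (l.filter (fun f => pvACC.contains f)) g, List.toFinset_filter]
    refine Finset.sum_congr rfl ?_
    intro k hk
    simp only [Finset.mem_filter] at hk
    rw [if_pos hk.2, List.count_filter hk.2, mul_comm]
  · have hdiff : PySem.Set.diff (PySem.Set.ofList l) pvACC
        = (PySem.Set.ofList l).filter (fun f => !pvACC.contains f) := rfl
    rw [hdiff, ← List.sum_toFinset _ (hnd.filter _), List.toFinset_filter, pv_toFinset_ofList]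
    refine Finset.sum_congr ?_ ?_
    · ext x; simp
    · intro k hk
      simp only [Finset.mem_filter] at hk
      rw [if_neg hk.2]

-- every relevant feature is one of the nine nonzero-weight keys
def pvNINE : List String :=
  ["YEARS_EXPERIENCE_REQUIRED", "ADVANCED_REQUIRED", "INDEPENDENCE_PREFERRED",
   "LEARNING_REQUIRED", "JUNIOR_FRIENDLY",
   "EXPLICITLY_SENIOR", "LEADERSHIP_REQUIRED", "TECH_DEGREE_REQUIRED", "EXPLICITLY_JUNIOR"]

lemma pv_rel_nine (x : String) (h : pvRELEVANT.contains x = true) : x ∈ pvNINE := by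
  have hR : pvRELEVANT = ["EXPLICITLY_SENIOR", "YEARS_EXPERIENCE_REQUIRED", "LEADERSHIP_REQUIRED",
      "TECH_DEGREE_REQUIRED", "ADVANCED_REQUIRED", "INDEPENDENCE_PREFERRED", "LEARNING_REQUIRED",
      "JUNIOR_FRIENDLY", "EXPLICITLY_JUNIOR"] := by decide
  rw [hR] at h
  simp [PySem.Set.contains] at h
  simp [pvNINE]
  tauto

-- a Finset sum over the distinct elements of a relevant-filtered list, written out
-- as nine membership-guarded terms
lemma pv_nine_sum (l : List String) (hrel : ∀ x ∈ l, pvRELEVANT.contains x = true)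
    (T : String → Int) :
    (∑ k ∈ l.toFinset, T k)
    = (pvNINE.map (fun k => if k ∈ l then T k else 0)).sum := by
  have hsub : l.toFinset ⊆ pvNINE.toFinset := by
    intro x hx
    rw [List.mem_toFinset] at hx ⊢
    exact pv_rel_nine x (hrel x hx)
  have hnd : pvNINE.Nodup := by decide
  rw [← List.sum_toFinset _ hnd]
  have hg : ∀ k, (if k ∈ l then T k else 0) = (if k ∈ l.toFinset then T k else 0) := by
    intro k; simp
  simp only [hg]
  rw [Finset.sum_ite_mem, Finset.inter_eq_right.mpr hsub]

-- B's loop: the fold's nine registers are the per-feature counts / seen-flags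
lemma pv_fold (l : List String) (s : JState) :
    l.foldl jStep s = ⟨s.years + l.count "YEARS_EXPERIENCE_REQUIRED",
      s.advanced + l.count "ADVANCED_REQUIRED",
      s.independence + l.count "INDEPENDENCE_PREFERRED",
      s.learning + l.count "LEARNING_REQUIRED",
      s.friendly + l.count "JUNIOR_FRIENDLY",
      s.senior || l.contains "EXPLICITLY_SENIOR",
      s.leadership || l.contains "LEADERSHIP_REQUIRED",
      s.degree || l.contains "TECH_DEGREE_REQUIRED",
      s.junior || l.contains "EXPLICITLY_JUNIOR"⟩ := by
  induction l generalizing s with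
  | nil => simp
  | cons f t ih =>
    rw [List.foldl_cons, ih]
    unfold jStep
    split_ifs with h1 h2 h3 h4 h5 h6 h7 h8 h9
    · simp only [beq_iff_eq] at h1; subst h1
      simp [JState.mk.injEq]; omega
    · simp only [beq_iff_eq] at h2; subst h2
      simp [JState.mk.injEq]; omega
    · simp only [beq_iff_eq] at h3; subst h3
      simp [JState.mk.injEq]; omega
    · simp only [beq_iff_eq] at h4; subst h4
      simp [JState.mk.injEq]; omega
    · simp only [beq_iff_eq] at h5; subst h5
      simp [JState.mk.injEq]; omega
    · simp only [beq_iff_eq] at h6; subst h6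
      simp
    · simp only [beq_iff_eq] at h7; subst h7
      simp
    · simp only [beq_iff_eq] at h8; subst h8
      simp
    · simp only [beq_iff_eq] at h9; subst h9
      simp
    · simp only [beq_iff_eq] at h1 h2 h3 h4 h5 h6 h7 h8 h9
      simp [h1, h2, h3, h4, h5, Ne.symm h6, Ne.symm h7, Ne.symm h8, Ne.symm h9]

lemma pv_guard_count (l : List String) (k : String) (w : Int) :
    (if k ∈ l then (l.count k : Int) * w else 0) = (l.count k : Int) * w := by
  by_cases h : k ∈ l
  · simp [h]
  · simp [h, List.count_eq_zero_of_not_mem h]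

lemma pv_len_one (m : List String) : ((m.map (fun _ => (1 : Int))).sum) = m.length := by
  induction m with
  | nil => simp
  | cons a t ih => simp; ring

lemma pv_b2i (l : List String) (k : String) :
    b2i (l.contains k) = if k ∈ l then (1 : Int) else 0 := by
  by_cases h : k ∈ l <;> simp [b2i, h]

-- ===== VERDICT (by name: the statement is the Claim_ definition above) =====
theorem calc_junior_rank_spec : Claim_equal_calc_junior_rank := by
  intro features _
  show calc_junior_rank features = calc_junior_rank_alt features
  unfold calc_junior_rank calc_junior_rank_alt
  rw [pv_fold]
  set l := features.filter (fun f => pvRELEVANT.contains f) with hl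
  have hrel : ∀ x ∈ l, pvRELEVANT.contains x = true := fun x hx => (List.mem_filter.mp hx).2
  have hc : ∀ k : String, pvRELEVANT.contains k = true →
      l.count k = features.count k ∧ ((k ∈ l) = (k ∈ features)) := by
    intro k hk
    constructor
    · rw [hl, List.count_filter hk]
    · rw [hl]; simp only [List.mem_filter, hk, and_true]
  have hsum : ∀ g : String → Int,
      ((l.filter (fun f => pvACC.contains f)).map g).sum
        + ((PySem.Set.diff (PySem.Set.ofList l) pvACC).map g).sum
      = (features.count "YEARS_EXPERIENCE_REQUIRED" : Int) * g "YEARS_EXPERIENCE_REQUIRED" + (features.count "ADVANCED_REQUIRED" : Int) * g "ADVANCED_REQUIRED" + (features.count "INDEPENDENCE_PREFERRED" : Int) * g "INDEPENDENCE_PREFERRED" + (features.count "LEARNING_REQUIRED" : Int) * g "LEARNING_REQUIRED" + (features.count "JUNIOR_FRIENDLY" : Int) * g "JUNIOR_FRIENDLY" + (if "EXPLICITLY_SENIOR" ∈ features then g "EXPLICITLY_SENIOR" else 0) + (if "LEADERSHIP_REQUIRED" ∈ features then g "LEADERSHIP_REQUIRED" else 0) + (if "TECH_DEGREE_REQUIRED"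 ∈ features then g "TECH_DEGREE_REQUIRED" else 0) + (if "EXPLICITLY_JUNIOR" ∈ features then g "EXPLICITLY_JUNIOR" else 0) := by
    intro g
    rw [pv_master l g, pv_nine_sum l hrel]
    simp only [pvNINE, List.map_cons, List.map_nil, List.sum_cons, List.sum_nil,
      (by decide : pvACC.contains "YEARS_EXPERIENCE_REQUIRED" = true),
      (by decide : pvACC.contains "ADVANCED_REQUIRED" = true),
      (by decide : pvACC.contains "INDEPENDENCE_PREFERRED" = true),
      (by decide : pvACC.contains "LEARNING_REQUIRED" = true),
      (by decide : pvACC.contains "JUNIOR_FRIENDLY" = true),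
      (by decide : pvACC.contains "EXPLICITLY_SENIOR" = false),
      (by decide : pvACC.contains "LEADERSHIP_REQUIRED" = false),
      (by decide : pvACC.contains "TECH_DEGREE_REQUIRED" = false),
      (by decide : pvACC.contains "EXPLICITLY_JUNIOR" = false),
      Bool.false_eq_true, if_true, if_false, pv_guard_count]
    simp only [(hc "YEARS_EXPERIENCE_REQUIRED" (by decide)).1, (hc "ADVANCED_REQUIRED" (by decide)).1,
        (hc "INDEPENDENCE_PREFERRED" (by decide)).1,
        (hc "LEARNING_REQUIRED" (by decide)).1, (hc "JUNIOR_FRIENDLY" (by decide)).1,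
        (hc "EXPLICITLY_SENIOR" (by decide)).2, (hc "LEADERSHIP_REQUIRED" (by decide)).2,
        (hc "TECH_DEGREE_REQUIRED" (by decide)).2, (hc "EXPLICITLY_JUNIOR" (by decide)).2]
    ring
  have hlen : ((l.filter (fun f => pvACC.contains f)).length : Int)
        + ((PySem.Set.diff (PySem.Set.ofList l) pvACC).length : Int)
      = (features.count "YEARS_EXPERIENCE_REQUIRED" : Int) + (features.count "ADVANCED_REQUIRED" : Int) + (features.count "INDEPENDENCE_PREFERRED" : Int) + (features.count "LEARNING_REQUIRED" : Int) + (features.count "JUNIOR_FRIENDLY" : Int) + (if "EXPLICITLY_SENIOR" ∈ features then (1 : Int) else 0) + (if "LEADERSHIP_REQUIRED" ∈ features then (1 : Int) else 0) + (if "TECH_DEGREE_REQUIRED" ∈ features then (1 : Int) else 0) + (if "EXPLICITLY_JUNIOR" ∈ features then (1 : Int) else 0) := by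
    have h1 := hsum (fun _ => (1 : Int))
    simp only [mul_one] at h1
    rw [← pv_len_one, ← pv_len_one]
    exact h1
  have hsgn := hsum (fun f => pvWEIGHTS.getD f 0 / |pvWEIGHTS.getD f 0|)
  have hwt := hsum (fun f => pvWEIGHTS.getD f 0)
  simp only [List.length_append, List.map_append, List.sum_append, pv_b2i, zero_add,
    Bool.false_or]
  rw [hsgn, hwt]
  have e1 : ((List.filter (fun f => pvACC.contains f) l).length
        + ((PySem.Set.ofList l).diff pvACC).length ≤ 1)
      = ((features.count "YEARS_EXPERIENCE_REQUIRED" : Int)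
        + (features.count "ADVANCED_REQUIRED" : Int)
        + (features.count "INDEPENDENCE_PREFERRED" : Int)
        + (features.count "LEARNING_REQUIRED" : Int)
        + (features.count "JUNIOR_FRIENDLY" : Int)
        + (if "EXPLICITLY_SENIOR" ∈ features then (1 : Int) else 0)
        + (if "LEADERSHIP_REQUIRED" ∈ features then (1 : Int) else 0)
        + (if "TECH_DEGREE_REQUIRED" ∈ features then (1 : Int) else 0)
        + (if "EXPLICITLY_JUNIOR" ∈ features then (1 : Int) else 0) ≤ 1) := by
    rw [← hlen]; refine propext ?_; omega
  have e2 : ((List.filter (fun f => pvACC.contains f) l).length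
        + ((PySem.Set.ofList l).diff pvACC).length ≤ 2)
      = ((features.count "YEARS_EXPERIENCE_REQUIRED" : Int)
        + (features.count "ADVANCED_REQUIRED" : Int)
        + (features.count "INDEPENDENCE_PREFERRED" : Int)
        + (features.count "LEARNING_REQUIRED" : Int)
        + (features.count "JUNIOR_FRIENDLY" : Int)
        + (if "EXPLICITLY_SENIOR" ∈ features then (1 : Int) else 0)
        + (if "LEADERSHIP_REQUIRED" ∈ features then (1 : Int) else 0)
        + (if "TECH_DEGREE_REQUIRED" ∈ features then (1 : Int) else 0)
        + (if "EXPLICITLY_JUNIOR" ∈ features then (1 : Int) else 0) ≤ 2) := by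
    rw [← hlen]; refine propext ?_; omega
  simp only [e1, e2,
    (by decide : pvWEIGHTS.getD "YEARS_EXPERIENCE_REQUIRED" 0 = -8),
    (by decide : pvWEIGHTS.getD "ADVANCED_REQUIRED" 0 = -4),
    (by decide : pvWEIGHTS.getD "INDEPENDENCE_PREFERRED" 0 = -2),
    (by decide : pvWEIGHTS.getD "LEARNING_REQUIRED" 0 = 2),
    (by decide : pvWEIGHTS.getD "JUNIOR_FRIENDLY" 0 = 4),
    (by decide : pvWEIGHTS.getD "EXPLICITLY_SENIOR" 0 = -8),
    (by decide : pvWEIGHTS.getD "LEADERSHIP_REQUIRED" 0 = -8),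
    (by decide : pvWEIGHTS.getD "TECH_DEGREE_REQUIRED" 0 = -6),
    (by decide : pvWEIGHTS.getD "EXPLICITLY_JUNIOR" 0 = 6)]
  by_cases hS : "EXPLICITLY_SENIOR" ∈ features <;>
    by_cases hLd : "LEADERSHIP_REQUIRED" ∈ features <;>
      by_cases hD : "TECH_DEGREE_REQUIRED" ∈ features <;>
        by_cases hJu : "EXPLICITLY_JUNIOR" ∈ features <;>
          simp only [hS, hLd, hD, hJu, if_true, if_false] <;>
            split_ifs <;> push_cast <;> ring
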